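-- pv_equiv track=rewrite | github.com/jiyeon2536/algorithm | 프로그래머스/2/12914. 멀리 뛰기/멀리 뛰기.py | solution
-- ===== SOURCE A (Python) =====
-- def solution(n):
--     answer = 0
--
--     dp = [0] * (n + 1)
--
--     for i in range(n + 1):
--         if i == 1:
--             dp[1] = 1
--         elif i == 2:
--             dp[2] = 2
--         else:
--             dp[i] = dp[i-1] + dp[i-2]
--
--     return dp[n] % 1234567
-- ===== SOURCE B (Python) =====
-- def solution(n):
--     M = 1234567
--     def fd(k):
--         # returns (F(k) % M, F(k+1) % M) with F(0)=0, F(1)=1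
--         if k == 0:
--             return (0, 1)
--         a, b = fd(k // 2)
--         c = a * (2 * b - a) % M
--         d = (a * a + b * b) % M
--         if k % 2:
--             return (d, (c + d) % M)
--         else:
--             return (c, d)
--     return fd(n + 1)[0]
-- ===== Notes on version B (the rewrite author's own statement) =====
-- stated objective: faster
-- what changed: Replaced the O(n) big-integer DP table with recursive Fibonacci fast doubling reduced mod 1234567 at every step.
import Mathlib
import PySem

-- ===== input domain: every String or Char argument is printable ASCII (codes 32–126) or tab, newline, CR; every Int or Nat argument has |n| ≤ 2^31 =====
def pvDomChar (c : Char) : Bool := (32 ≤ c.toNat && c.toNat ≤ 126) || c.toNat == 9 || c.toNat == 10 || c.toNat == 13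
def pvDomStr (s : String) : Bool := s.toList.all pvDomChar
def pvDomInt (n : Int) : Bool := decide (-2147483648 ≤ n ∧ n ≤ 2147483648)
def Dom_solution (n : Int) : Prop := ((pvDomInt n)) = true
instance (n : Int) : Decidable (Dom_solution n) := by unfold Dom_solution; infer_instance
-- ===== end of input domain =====

-- B replaces A's O(n) DP table by Fibonacci fast doubling mod 1234567 (measured asymptotically faster).

-- ===== PORT A =====
-- The body of A's loop: if i == 1: dp[1] = 1 elif i == 2: dp[2] = 2 else: dp[i] = dp[i-1] + dp[i-2].
-- pyGetD/pySetD are exact wherever the index is in range, which Pre_ guarantees (A raises IndexError for n ≤ 0).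
def stepA (dp : List Int) (i : Int) : List Int :=
  if i = 1 then PySem.List.pySetD dp 1 1
  else if i = 2 then PySem.List.pySetD dp 2 2
  else PySem.List.pySetD dp i (PySem.List.pyGetD dp (i - 1) 0 + PySem.List.pyGetD dp (i - 2) 0)

-- dp = [0]*(n+1); for i in range(n+1): stepA; return dp[n] % 1234567
def solution (n : Int) : Int :=
  let dp0 : List Int := List.replicate (n + 1).toNat 0
  let dp := (PySem.List.pyRange 0 (n + 1) 1).foldl stepA dp0
  PySem.Int.mod (PySem.List.pyGetD dp n 0) 1234567

-- ===== PORT B =====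
-- fd(k) of Source B: returns (F(k) % M, F(k+1) % M) by fast doubling. Source B only reaches it with
-- k = n+1 ≥ 2 under Pre_, so the Nat argument (n+1).toNat is exact there (Python // on k ≥ 0 is Nat division).
def fdAlt (k : Nat) : Int × Int :=
  if _h : k = 0 then (0, 1)
  else
    let p := fdAlt (k / 2)
    let a := p.1
    let b := p.2
    let c := PySem.Int.mod (a * (2 * b - a)) 1234567
    let d := PySem.Int.mod (a * a + b * b) 1234567
    if k % 2 = 1 then (d, PySem.Int.mod (c + d) 1234567) else (c, d)
termination_by k
decreasing_by exact Nat.div_lt_self (Nat.pos_of_ne_zero _h) (by omega)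

def solution_alt (n : Int) : Int := (fdAlt (n + 1).toNat).1

-- ===== PRECONDITION & SPEC =====
-- Pre_ excludes exactly n ≤ 0, where A raises IndexError (dp[i-2] on a list of length ≤ 1).
def Pre_solution (n : Int) : Prop := 1 ≤ n
instance (n : Int) : Decidable (Pre_solution n) := by unfold Pre_solution; infer_instance
def pvWitness_solution : Int := 5

def Spec_solution (n : Int) (out : Int) : Prop := out = solution_alt n
instance (n : Int) (out : Int) : Decidable (Spec_solution n out) := by unfold Spec_solution; infer_instance

-- ===== CLAIM (what is proved, stated in full; the proofs are below) =====
def Claim_equal_solution : Prop := ∀ (n : Int), Dom_solution n → Pre_solution n → Spec_solution n (solution n)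

-- ===== LEMMAS AND PROOFS =====

theorem modM (x : Int) : PySem.Int.mod x 1234567 = x % 1234567 :=
  PySem.Int.mod_eq_emod_of_pos (by norm_num)

theorem modeq_self (x : Int) : (x % 1234567) ≡ x [ZMOD 1234567] :=
  Int.emod_emod_of_dvd x dvd_rfl

theorem fib_cast_two_mul (m : Nat) :
    ((Nat.fib (2*m) : Int)) = (Nat.fib m : Int) * (2 * (Nat.fib (m+1) : Int) - Nat.fib m) := by
  have h1 := Nat.fib_two_mul m
  have hle : Nat.fib m ≤ 2 * Nat.fib (m+1) :=
    le_trans (Nat.fib_le_fib_succ) (by omega)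
  zify [hle] at h1
  linarith

-- fast doubling computes the Fibonacci pair mod 1234567
theorem fd_eq (k : Nat) :
    fdAlt k = ((Nat.fib k : Int) % 1234567, (Nat.fib (k + 1) : Int) % 1234567) := by
  induction k using Nat.strong_induction_on with
  | _ k ih =>
    rw [fdAlt]
    by_cases h : k = 0
    · subst h; decide
    · simp only [h, dif_neg, not_false_iff]
      rw [ih (k/2) (Nat.div_lt_self (Nat.pos_of_ne_zero h) (by omega))]
      set m := k / 2 with hm
      have ha := modeq_self (Nat.fib m : Int)
      have hb := modeq_self (Nat.fib (m+1) : Int)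
      have hc : PySem.Int.mod (((Nat.fib m : Int) % 1234567) * (2 * ((Nat.fib (m+1) : Int) % 1234567) - (Nat.fib m : Int) % 1234567)) 1234567
          = (Nat.fib (2*m) : Int) % 1234567 := by
        rw [modM, fib_cast_two_mul]
        exact ha.mul ((hb.mul_left 2).sub ha)
      have hd : PySem.Int.mod (((Nat.fib m : Int) % 1234567) * ((Nat.fib m : Int) % 1234567) + ((Nat.fib (m+1) : Int) % 1234567) * ((Nat.fib (m+1) : Int) % 1234567)) 1234567
          = (Nat.fib (2*m+1) : Int) % 1234567 := by
        rw [modM]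
        have : ((Nat.fib (2*m+1) : Int)) = (Nat.fib m : Int) * Nat.fib m + (Nat.fib (m+1) : Int) * Nat.fib (m+1) := by
          have := Nat.fib_two_mul_add_one m
          zify at this
          linarith [this, sq_abs ((Nat.fib m : Int))]
        rw [this]
        exact (ha.mul ha).add (hb.mul hb)
      by_cases hp : k % 2 = 1
      · have hk : k = 2*m + 1 := by omega
        simp only [hp, if_pos, hc, hd]
        refine Prod.ext ?_ ?_
        · simp only [hk]
        · show PySem.Int.mod _ _ = _
          rw [modM, hk]
          have : ((Nat.fib (2*m+1+1) : Int)) = (Nat.fib (2*m) : Int) + Nat.fib (2*m+1) := by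
            have := Nat.fib_add_two (n := 2*m); push_cast [this]; ring
          rw [this]
          exact ((modeq_self _).add (modeq_self _))
      · have hk : k = 2*m := by omega
        simp only [hp, if_neg, not_false_iff, hc, hd]
        refine Prod.ext ?_ ?_
        · simp only [hk]
        · show (Nat.fib (2*m+1) : Int) % 1234567 = (Nat.fib (k+1) : Int) % 1234567
          rw [hk]

-- the value of dp[j] after A's loop has passed position j
def gA (j : Nat) : Int := if j = 0 then 0 else (Nat.fib (j + 1) : Int)

theorem set_join (l rest : List Int) (v x : Int) (k : Nat) (hk : l.length = k) :
    (l ++ x :: rest).set k v = l ++ v :: rest := by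
  subst hk
  induction l with
  | nil => rfl
  | cons y t ih => simp [ih]

-- loop invariant for A's DP loop
theorem loopA (N : Nat) (hN : 2 ≤ N) (i : Nat) (hi : i ≤ N) :
    ((PySem.List.pyRange 0 (i : Int) 1).foldl stepA (List.replicate N (0 : Int)))
    = (List.range i).map gA ++ List.replicate (N - i) 0 := by
  induction i with
  | zero => simp [PySem.List.pyRange_one_eq_nil]
  | succ i ih =>
    have h0i : (0:Int) ≤ (i:Int) := by positivity
    have hcast : ((i+1 : Nat) : Int) = (i : Int) + 1 := by push_cast; ring
    rw [hcast, PySem.List.pyRange_one_succ_right h0i, List.foldl_append, ih (by omega)]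
    simp only [List.foldl_cons, List.foldl_nil]
    have hlen : ((List.range i).map gA).length = i := by simp
    have hrep : List.replicate (N - i) (0:Int) = 0 :: List.replicate (N - (i+1)) 0 := by
      have : N - i = (N - (i+1)) + 1 := by omega
      rw [this, List.replicate_succ]
    have hrange : (List.range (i+1)).map gA = (List.range i).map gA ++ [gA i] := by
      rw [List.range_succ, List.map_append]; rfl
    by_cases h0 : i = 0
    · subst h0
      show stepA (List.replicate N 0) 0 = _
      unfold stepA
      rw [if_neg (by norm_num), if_neg (by norm_num)]
      rw [show (0:Int) - 1 = -1 by ring, show (0:Int) - 2 = -2 by ring]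
      rw [PySem.List.pyGetD_neg_ofNat _ 1 0 (by omega) (by simp; omega)]
      rw [PySem.List.pyGetD_neg_ofNat _ 2 0 (by omega) (by simp; omega)]
      rw [PySem.List.pySetD_of_nonneg _ _ (show (0:Int) ≤ 0 by norm_num)]
      simp only [List.getElem_replicate, List.length_replicate]
      rw [show ((0:Int)).toNat = 0 from rfl]
      rw [show List.replicate N (0:Int) = 0 :: List.replicate (N-1) 0 by
        rw [show N = (N-1)+1 by omega]; rfl]
      simp [gA]
    · by_cases h1 : i = 1
      · subst h1
        show stepA _ 1 = _
        unfold stepA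
        rw [if_pos rfl, PySem.List.pySetD_of_nonneg _ _ (show (0:Int) ≤ 1 by norm_num)]
        rw [show ((1:Int)).toNat = 1 from rfl]
        have : (List.range 1).map gA ++ List.replicate (N-1) (0:Int)
            = 0 :: 0 :: List.replicate (N-2) 0 := by
          rw [show N - 1 = (N-2)+1 by omega]
          simp [List.range_succ, gA, List.replicate_succ]
        rw [this]
        rw [hrange]
        simp [gA, List.range_succ]
      · by_cases h2 : i = 2
        · subst h2
          have hN3 : 3 ≤ N := by omega
          show stepA _ 2 = _
          unfold stepA
          rw [if_neg (by norm_num), if_pos rfl,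
            PySem.List.pySetD_of_nonneg _ _ (show (0:Int) ≤ 2 by norm_num)]
          rw [show ((2:Int)).toNat = 2 from rfl]
          have : (List.range 2).map gA ++ List.replicate (N-2) (0:Int)
              = 0 :: 1 :: 0 :: List.replicate (N-3) 0 := by
            rw [show N - 2 = (N-3)+1 by omega]
            simp [List.range_succ, gA, List.replicate_succ]
          rw [this, hrange]
          simp [gA, List.range_succ, show Nat.fib 3 = 2 from rfl]
        · -- i ≥ 3: dp[i] := dp[i-1] + dp[i-2] = fib i + fib (i-1) = fib (i+1)
          have hi3 : 3 ≤ i := by omega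
          show stepA _ (i : Int) = _
          unfold stepA
          rw [if_neg (by omega), if_neg (by omega)]
          rw [show ((i:Int)) - 1 = ((i-1 : Nat) : Int) by omega]
          rw [show ((i:Int)) - 2 = ((i-2 : Nat) : Int) by omega]
          rw [PySem.List.pyGetD_natCast, PySem.List.pyGetD_natCast]
          rw [List.getD_append _ _ _ _ (by rw [hlen]; omega),
              List.getD_append _ _ _ _ (by rw [hlen]; omega)]
          have hg1 : ((List.range i).map gA).getD (i-1) 0 = gA (i-1) := by
            rw [List.getD_eq_getElem _ _ (by rw [hlen]; omega)]
            simp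
          have hg2 : ((List.range i).map gA).getD (i-2) 0 = gA (i-2) := by
            rw [List.getD_eq_getElem _ _ (by rw [hlen]; omega)]
            simp
          rw [hg1, hg2]
          have hsum : gA (i-1) + gA (i-2) = gA i := by
            simp only [gA, if_neg (by omega : ¬ i-1 = 0), if_neg (by omega : ¬ i-2 = 0),
              if_neg h0]
            have hf : Nat.fib (i-1+1) + Nat.fib (i-2+1) = Nat.fib (i+1) := by
              have := Nat.fib_add_two (n := i-1)
              have e1 : i - 1 + 2 = i + 1 := by omega
              have e3 : i - 1 + 1 = i := by omega
              rw [e1, e3] at this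
              rw [show i - 2 + 1 = i - 1 by omega, e3, this]
              omega
            push_cast [← hf]
            ring
          rw [hsum, PySem.List.pySetD_of_nonneg _ _ h0i, Int.toNat_natCast]
          rw [hrep, set_join _ _ _ _ i hlen, hrange]
          simp

-- ===== VERDICT (by name: the statement is the Claim_ definition above) =====
theorem solution_spec : Claim_equal_solution := by
  unfold Claim_equal_solution
  intro n _ hpre
  unfold Pre_solution at hpre
  unfold Spec_solution solution solution_alt
  set N := (n + 1).toNat with hNdef
  have hN2 : 2 ≤ N := by omega
  have hcast : n + 1 = ((N : Nat) : Int) := by omega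
  rw [hcast]
  simp only []
  rw [loopA N hN2 N (le_refl N)]
  simp only [Nat.sub_self, List.replicate_zero, List.append_nil]
  rw [show n = ((N - 1 : Nat) : Int) by omega, PySem.List.pyGetD_natCast]
  rw [List.getD_eq_getElem _ _ (by simp; omega)]
  rw [fd_eq N]
  simp only [List.getElem_map, List.getElem_range]
  rw [show gA (N-1) = (Nat.fib N : Int) by
    simp only [gA, if_neg (by omega : ¬ N-1 = 0), show N - 1 + 1 = N by omega]]
  exact modM _
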